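-- pv_equiv track=rewrite | github.com/HazyResearch/metal | metal/mmtl/debugging/slicing.py | slice_morepeople
-- ===== SOURCE A (Python) =====
-- def slice_morepeople(row):
--     people = 0
--     sentence = row["sentence1"].split()
--     for pronoun in ["she", "her", "hers"]:
--         if pronoun in sentence:
--             people += 1
--             break
--     for pronoun in ["he", "him", "his"]:
--         if pronoun in sentence:
--             people += 1
--             break
--     for pronoun in ["you", "your", "yours"]:
--         if pronoun in sentence:
--             people += 1
--             break
--     for pronoun in ["I", "my", "me", "mine"]:
--         if pronoun in sentence:
--             people += 1
--             break
--     return people > 1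
-- ===== SOURCE B (Python) =====
-- _GROUP = {"she": 0, "her": 0, "hers": 0,
--           "he": 1, "him": 1, "his": 1,
--           "you": 2, "your": 2, "yours": 2,
--           "I": 3, "my": 3, "me": 3, "mine": 3}
--
--
-- def slice_morepeople(row):
--     seen = set()
--     for word in row["sentence1"].split():
--         g = _GROUP.get(word)
--         if g is not None:
--             seen.add(g)
--     return len(seen) > 1
-- ===== Notes on version B (the rewrite author's own statement) =====
-- stated objective: alternative
-- what changed: Replaces the four independent group scans over the sentence by a single pass over the sentence words driven by a prebuilt pronoun-to-group-id dict, collecting seen group ids in a set and testing len(seen) > 1.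
import Mathlib
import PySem

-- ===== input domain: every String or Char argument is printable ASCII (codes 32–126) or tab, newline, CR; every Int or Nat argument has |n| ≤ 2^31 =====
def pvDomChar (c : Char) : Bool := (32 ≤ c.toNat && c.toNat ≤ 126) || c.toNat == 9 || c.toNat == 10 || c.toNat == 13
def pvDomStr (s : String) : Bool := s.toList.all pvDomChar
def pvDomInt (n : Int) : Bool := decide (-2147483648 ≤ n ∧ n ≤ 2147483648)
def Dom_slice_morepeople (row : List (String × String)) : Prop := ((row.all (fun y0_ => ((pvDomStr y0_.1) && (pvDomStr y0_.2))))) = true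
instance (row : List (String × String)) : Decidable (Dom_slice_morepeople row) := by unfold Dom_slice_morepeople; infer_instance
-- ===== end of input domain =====

-- B replaces A's four group scans by one pass over the sentence words using a prebuilt
-- pronoun→group-id dict and a set of seen group ids (alternative decomposition, same cost).


-- ===== PORT A =====
def slice_morepeople (row : List (String × String)) : Bool :=
  match row.find? (fun p => p.1 == "sentence1") with
  | none => false  -- KeyError in Python; excluded by Pre_
  | some kv =>
    let sentence := PySem.Str.split₀ kv.2
    let people : Int := 0
    let people := if ["she", "her", "hers"].any (fun pr => sentence.contains pr) then people + 1 else people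
    let people := if ["he", "him", "his"].any (fun pr => sentence.contains pr) then people + 1 else people
    let people := if ["you", "your", "yours"].any (fun pr => sentence.contains pr) then people + 1 else people
    let people := if ["I", "my", "me", "mine"].any (fun pr => sentence.contains pr) then people + 1 else people
    decide (people > 1)

-- ===== PORT B =====
def pvGroups : PySem.Dict String Int :=
  PySem.Dict.mk [("she", 0), ("her", 0), ("hers", 0),
                 ("he", 1), ("him", 1), ("his", 1),
                 ("you", 2), ("your", 2), ("yours", 2),
                 ("I", 3), ("my", 3), ("me", 3), ("mine", 3)]

def slice_morepeople_alt (row : List (String × String)) : Bool :=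
  match row.find? (fun p => p.1 == "sentence1") with
  | none => false  -- KeyError in Python; excluded by Pre_
  | some kv =>
    let seen : PySem.Set Int :=
      (PySem.Str.split₀ kv.2).foldl (fun s w =>
        match pvGroups.get? w with
        | some g => PySem.Set.add s g
        | none => s) PySem.Set.empty
    decide (1 < PySem.Set.len seen)

-- ===== PRECONDITION & SPEC =====
-- Pre_ excludes exactly the rows without a "sentence1" key, on which Python A raises KeyError.
def Pre_slice_morepeople (row : List (String × String)) : Prop :=
  (row.map (·.1)).contains "sentence1" = true
instance (row : List (String × String)) : Decidable (Pre_slice_morepeople row) := by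
  unfold Pre_slice_morepeople; infer_instance
def pvWitness_slice_morepeople : (List (String × String)) := [("sentence1", "she saw him")]

def Spec_slice_morepeople (row : List (String × String)) (out : Bool) : Prop := out = slice_morepeople_alt row
instance (row : List (String × String)) (out : Bool) : Decidable (Spec_slice_morepeople row out) := by unfold Spec_slice_morepeople; infer_instance

-- ===== CLAIM (what is proved, stated in full; the proofs are below) =====
def Claim_equal_slice_morepeople : Prop := ∀ (row : List (String × String)), Dom_slice_morepeople row → Pre_slice_morepeople row → Spec_slice_morepeople row (slice_morepeople row)

-- ===== LEMMAS AND PROOFS =====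

set_option maxHeartbeats 1000000

theorem pvGroups_get?_iff (w : String) (g : Int) :
    pvGroups.get? w = some g ↔
      ((g = 0 ∧ (w = "she" ∨ w = "her" ∨ w = "hers")) ∨
       (g = 1 ∧ (w = "he" ∨ w = "him" ∨ w = "his")) ∨
       (g = 2 ∧ (w = "you" ∨ w = "your" ∨ w = "yours")) ∨
       (g = 3 ∧ (w = "I" ∨ w = "my" ∨ w = "me" ∨ w = "mine"))) := by
  rw [PySem.Dict.get?_eq_some_iff_mem_items pvGroups w g (by decide)]
  simp only [pvGroups, List.mem_cons, List.not_mem_nil, or_false,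
    Prod.mk.injEq]
  constructor
  · rintro (⟨rfl, rfl⟩ | ⟨rfl, rfl⟩ | ⟨rfl, rfl⟩ | ⟨rfl, rfl⟩ | ⟨rfl, rfl⟩ | ⟨rfl, rfl⟩ |
      ⟨rfl, rfl⟩ | ⟨rfl, rfl⟩ | ⟨rfl, rfl⟩ | ⟨rfl, rfl⟩ | ⟨rfl, rfl⟩ | ⟨rfl, rfl⟩ | ⟨rfl, rfl⟩) <;>
      decide
  · rintro (⟨rfl, rfl | rfl | rfl⟩ | ⟨rfl, rfl | rfl | rfl⟩ | ⟨rfl, rfl | rfl | rfl⟩ |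
      ⟨rfl, rfl | rfl | rfl | rfl⟩) <;> decide

theorem seen_mem (ws : List String) (s : PySem.Set Int) (g : Int) :
    g ∈ ws.foldl (fun s w =>
        match pvGroups.get? w with
        | some h => PySem.Set.add s h
        | none => s) s ↔ g ∈ s ∨ ∃ w ∈ ws, pvGroups.get? w = some g := by
  induction ws generalizing s with
  | nil => simp
  | cons w ws ih =>
    simp only [List.foldl_cons]
    cases hw : pvGroups.get? w with
    | none =>
      simp only [ih, List.mem_cons]
      constructor
      · rintro (hg | ⟨w', hw', hg⟩)
        · exact Or.inl hg
        · exact Or.inr ⟨w', Or.inr hw', hg⟩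
      · rintro (hg | ⟨w', rfl | hw', hg⟩)
        · exact Or.inl hg
        · rw [hw] at hg; cases hg
        · exact Or.inr ⟨w', hw', hg⟩
    | some h =>
      simp only [ih, PySem.Set.mem_add, List.mem_cons]
      constructor
      · rintro ((hg | rfl) | ⟨w', hw', hg⟩)
        · exact Or.inl hg
        · exact Or.inr ⟨w, Or.inl rfl, hw⟩
        · exact Or.inr ⟨w', Or.inr hw', hg⟩
      · rintro (hg | ⟨w', rfl | hw', hg⟩)
        · exact Or.inl (Or.inl hg)
        · rw [hw] at hg; injection hg with e; exact Or.inl (Or.inr e.symm)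
        · exact Or.inr ⟨w', hw', hg⟩

theorem seen_nodup (ws : List String) (s : PySem.Set Int) (hs : s.Nodup) :
    (ws.foldl (fun s w =>
        match pvGroups.get? w with
        | some h => PySem.Set.add s h
        | none => s) s).Nodup := by
  induction ws generalizing s with
  | nil => simpa
  | cons w ws ih =>
    simp only [List.foldl_cons]
    cases hw : pvGroups.get? w with
    | none => exact ih s hs
    | some h => exact ih _ (PySem.Set.nodup_add _ _ hs)

-- ===== VERDICT (by name: the statement is the Claim_ definition above) =====
theorem slice_morepeople_spec : Claim_equal_slice_morepeople := by
  intro row _ _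
  unfold Spec_slice_morepeople slice_morepeople slice_morepeople_alt
  cases hfind : row.find? (fun p => p.1 == "sentence1") with
  | none => rfl
  | some kv =>
    simp only
    set ws := PySem.Str.split₀ kv.2 with hws
    set seen := ws.foldl (fun s w =>
        match pvGroups.get? w with
        | some h => PySem.Set.add s h
        | none => s) PySem.Set.empty with hseen
    have hmem : ∀ g : Int, g ∈ seen ↔ ∃ w ∈ ws, pvGroups.get? w = some g := by
      intro g
      rw [hseen, seen_mem]
      simp [PySem.Set.empty]
    have hnd : seen.Nodup := seen_nodup ws PySem.Set.empty (by simp [PySem.Set.empty])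
    have hperm : seen.Perm (([0, 1, 2, 3] : List Int).filter
        (fun g => decide (∃ w ∈ ws, pvGroups.get? w = some g))) := by
      rw [List.perm_ext_iff_of_nodup hnd (List.Nodup.filter _ (by decide))]
      intro g
      rw [hmem g]
      simp only [List.mem_filter, decide_eq_true_eq]
      constructor
      · rintro ⟨w, hw, hg⟩
        refine ⟨?_, ⟨w, hw, hg⟩⟩
        rcases (pvGroups_get?_iff w g).mp hg with ⟨rfl, _⟩ | ⟨rfl, _⟩ | ⟨rfl, _⟩ | ⟨rfl, _⟩ <;> simp
      · exact fun h => h.2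
    have hlen : PySem.Set.len seen = (([0, 1, 2, 3] : List Int).filter
        (fun g => decide (∃ w ∈ ws, pvGroups.get? w = some g))).length := by
      simpa [PySem.Set.len] using congrArg Int.ofNat hperm.length_eq
    have h0 : (["she", "her", "hers"].any (fun pr => ws.contains pr)) =
        decide (∃ w ∈ ws, pvGroups.get? w = some 0) := by
      apply Bool.eq_iff_iff.mpr
      simp only [List.any_eq_true, List.mem_cons, List.not_mem_nil, or_false,
        List.contains_iff_mem, decide_eq_true_eq]
      constructor
      · rintro ⟨pr, rfl | rfl | rfl, hm⟩ <;>
          exact ⟨_, hm, by decide⟩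
      · rintro ⟨w, hw, hg⟩
        rcases (pvGroups_get?_iff w 0).mp hg with ⟨_, rfl | rfl | rfl⟩ | ⟨h, _⟩ | ⟨h, _⟩ | ⟨h, _⟩
        · exact ⟨"she", by decide, hw⟩
        · exact ⟨"her", by decide, hw⟩
        · exact ⟨"hers", by decide, hw⟩
        all_goals exact absurd h (by decide)
    have h1 : (["he", "him", "his"].any (fun pr => ws.contains pr)) =
        decide (∃ w ∈ ws, pvGroups.get? w = some 1) := by
      apply Bool.eq_iff_iff.mpr
      simp only [List.any_eq_true, List.mem_cons, List.not_mem_nil, or_false,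
        List.contains_iff_mem, decide_eq_true_eq]
      constructor
      · rintro ⟨pr, rfl | rfl | rfl, hm⟩ <;>
          exact ⟨_, hm, by decide⟩
      · rintro ⟨w, hw, hg⟩
        rcases (pvGroups_get?_iff w 1).mp hg with ⟨h, _⟩ | ⟨_, rfl | rfl | rfl⟩ | ⟨h, _⟩ | ⟨h, _⟩
        case inl => exact absurd h (by decide)
        · exact ⟨"he", by decide, hw⟩
        · exact ⟨"him", by decide, hw⟩
        · exact ⟨"his", by decide, hw⟩
        all_goals exact absurd h (by decide)
    have h2 : (["you", "your", "yours"].any (fun pr => ws.contains pr)) =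
        decide (∃ w ∈ ws, pvGroups.get? w = some 2) := by
      apply Bool.eq_iff_iff.mpr
      simp only [List.any_eq_true, List.mem_cons, List.not_mem_nil, or_false,
        List.contains_iff_mem, decide_eq_true_eq]
      constructor
      · rintro ⟨pr, rfl | rfl | rfl, hm⟩ <;>
          exact ⟨_, hm, by decide⟩
      · rintro ⟨w, hw, hg⟩
        rcases (pvGroups_get?_iff w 2).mp hg with ⟨h, _⟩ | ⟨h, _⟩ | ⟨_, rfl | rfl | rfl⟩ | ⟨h, _⟩
        case inl => exact absurd h (by decide)
        case inr.inl => exact absurd h (by decide)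
        · exact ⟨"you", by decide, hw⟩
        · exact ⟨"your", by decide, hw⟩
        · exact ⟨"yours", by decide, hw⟩
        all_goals exact absurd h (by decide)
    have h3 : (["I", "my", "me", "mine"].any (fun pr => ws.contains pr)) =
        decide (∃ w ∈ ws, pvGroups.get? w = some 3) := by
      apply Bool.eq_iff_iff.mpr
      simp only [List.any_eq_true, List.mem_cons, List.not_mem_nil, or_false,
        List.contains_iff_mem, decide_eq_true_eq]
      constructor
      · rintro ⟨pr, rfl | rfl | rfl | rfl, hm⟩ <;>
          exact ⟨_, hm, by decide⟩
      · rintro ⟨w, hw, hg⟩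
        rcases (pvGroups_get?_iff w 3).mp hg with ⟨h, _⟩ | ⟨h, _⟩ | ⟨h, _⟩ | ⟨_, rfl | rfl | rfl | rfl⟩
        case inl => exact absurd h (by decide)
        case inr.inl => exact absurd h (by decide)
        case inr.inr.inl => exact absurd h (by decide)
        · exact ⟨"I", by decide, hw⟩
        · exact ⟨"my", by decide, hw⟩
        · exact ⟨"me", by decide, hw⟩
        · exact ⟨"mine", by decide, hw⟩
    rw [h0, h1, h2, h3, hlen]
    by_cases c0 : (∃ w ∈ ws, pvGroups.get? w = some 0) <;>
      by_cases c1 : (∃ w ∈ ws, pvGroups.get? w = some 1) <;>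
      by_cases c2 : (∃ w ∈ ws, pvGroups.get? w = some 2) <;>
      by_cases c3 : (∃ w ∈ ws, pvGroups.get? w = some 3) <;>
        simp only [c0, c1, c2, c3, decide_true, decide_false, List.filter_cons,
          List.filter_nil, if_true, List.length] <;> decide
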